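-- pv_equiv track=rewrite | github.com/Euda1mon1a/Autonomous-Assignment-Program-Manager | scripts/scheduling/fill_template_osa.py | _match_rotation
-- ===== SOURCE A (Python) =====
-- def _match_rotation(
--     db_rot1: str,
--     db_rot2: str,
--     rotation_rows: dict[int, tuple[str, str]],
--     claimed: set[int],
-- ) -> int | None:
--     """Match a person to a template row by rotation code (fallback).
--
--     Exact match on rot1+rot2. First unclaimed match wins (for duplicates
--     like two ELEC rows).
--     """
--     for row in sorted(rotation_rows.keys()):
--         if row in claimed:
--             continue
--         tmpl_rot1, tmpl_rot2 = rotation_rows[row]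
--         if tmpl_rot1 == db_rot1 and tmpl_rot2 == db_rot2:
--             return row
--     return None
-- ===== SOURCE B (Python) =====
-- def _match_rotation(
--     db_rot1: str,
--     db_rot2: str,
--     rotation_rows: dict[int, tuple[str, str]],
--     claimed: set[int],
-- ) -> int | None:
--     best = None
--     for row, (tmpl_rot1, tmpl_rot2) in rotation_rows.items():
--         if row in claimed or tmpl_rot1 != db_rot1 or tmpl_rot2 != db_rot2:
--             continue
--         if best is None or row < best:
--             best = row
--     return best
-- ===== Notes on version B (the rewrite author's own statement) =====
-- stated objective: faster
-- what changed: Drops the sort: one pass over the dict items maintaining the running minimum matching unclaimed key instead of scanning sorted keys for the first match.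
import Mathlib
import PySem

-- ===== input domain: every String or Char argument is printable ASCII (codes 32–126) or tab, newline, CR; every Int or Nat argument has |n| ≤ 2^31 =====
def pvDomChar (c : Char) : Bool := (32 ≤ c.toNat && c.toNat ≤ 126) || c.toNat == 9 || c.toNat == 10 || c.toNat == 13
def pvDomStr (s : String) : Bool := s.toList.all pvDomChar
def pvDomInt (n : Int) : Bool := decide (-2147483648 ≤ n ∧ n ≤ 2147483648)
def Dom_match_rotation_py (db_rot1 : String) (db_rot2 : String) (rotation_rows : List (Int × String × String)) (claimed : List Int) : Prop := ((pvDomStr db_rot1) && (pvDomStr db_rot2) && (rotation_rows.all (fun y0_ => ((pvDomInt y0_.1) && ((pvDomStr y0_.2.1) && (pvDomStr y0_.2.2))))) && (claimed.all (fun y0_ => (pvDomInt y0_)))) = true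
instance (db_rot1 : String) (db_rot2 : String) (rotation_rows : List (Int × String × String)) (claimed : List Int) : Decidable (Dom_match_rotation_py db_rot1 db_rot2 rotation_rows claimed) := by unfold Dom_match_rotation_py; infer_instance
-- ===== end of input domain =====

-- B drops A's sort of the keys and instead makes one pass over the dict items,
-- maintaining the running minimum matching unclaimed key (objective: faster, O(n) vs O(n log n)).

-- ===== PORT A =====
-- the 'for row in sorted(rotation_rows.keys()): …' loop of A, over the remaining sorted keys
def matchRotLoopA (db_rot1 db_rot2 : String) (rotation_rows : List (Int × String × String))
    (claimed : List Int) : List Int → Option Int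
  | [] => none
  | row :: rest =>
    if claimed.contains row then matchRotLoopA db_rot1 db_rot2 rotation_rows claimed rest
    else
      -- rotation_rows[row]: dict lookup = first match in the association list
      match rotation_rows.find? (fun e => e.1 == row) with
      | some e =>
        if e.2.1 == db_rot1 && e.2.2 == db_rot2 then some row
        else matchRotLoopA db_rot1 db_rot2 rotation_rows claimed rest
      | none => matchRotLoopA db_rot1 db_rot2 rotation_rows claimed rest  -- unreachable: row comes from the keys

def match_rotation_py (db_rot1 : String) (db_rot2 : String) (rotation_rows : List (Int × String × String)) (claimed : List Int) : Option Int :=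
  matchRotLoopA db_rot1 db_rot2 rotation_rows claimed
    (PySem.List.sorted (rotation_rows.map (fun e => e.1)) (fun x => x) false)

-- ===== PORT B =====
def match_rotation_py_alt (db_rot1 : String) (db_rot2 : String) (rotation_rows : List (Int × String × String)) (claimed : List Int) : Option Int :=
  rotation_rows.foldl
    (fun best e =>
      if claimed.contains e.1 || !(e.2.1 == db_rot1) || !(e.2.2 == db_rot2) then best
      else
        match best with
        | none => some e.1
        | some b => if e.1 < b then some e.1 else some b)
    none

-- ===== PRECONDITION & SPEC =====
-- Pre_ excludes association lists with duplicate keys: they do not represent any Python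
-- dict (A's rotation_rows is a dict, whose keys are unique by construction), and the
-- first-match lookup convention makes their meaning accidental.
def Pre_match_rotation_py (db_rot1 : String) (db_rot2 : String) (rotation_rows : List (Int × String × String)) (claimed : List Int) : Prop :=
  (rotation_rows.map (fun e => e.1)).Nodup
instance (db_rot1 : String) (db_rot2 : String) (rotation_rows : List (Int × String × String)) (claimed : List Int) : Decidable (Pre_match_rotation_py db_rot1 db_rot2 rotation_rows claimed) := by unfold Pre_match_rotation_py; infer_instance

def pvWitness_match_rotation_py : String × String × (List (Int × String × String)) × List Int :=
  ("AA", "BB", [(3, "AA", "BB"), (1, "XX", "BB")], [2])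

def Spec_match_rotation_py (db_rot1 : String) (db_rot2 : String) (rotation_rows : List (Int × String × String)) (claimed : List Int) (out : Option Int) : Prop := out = match_rotation_py_alt db_rot1 db_rot2 rotation_rows claimed
instance (db_rot1 : String) (db_rot2 : String) (rotation_rows : List (Int × String × String)) (claimed : List Int) (out : Option Int) : Decidable (Spec_match_rotation_py db_rot1 db_rot2 rotation_rows claimed out) := by unfold Spec_match_rotation_py; infer_instance

-- ===== CLAIM (what is proved, stated in full; the proofs are below) =====
def Claim_equal_match_rotation_py : Prop := ∀ (db_rot1 : String) (db_rot2 : String) (rotation_rows : List (Int × String × String)) (claimed : List Int), Dom_match_rotation_py db_rot1 db_rot2 rotation_rows claimed → Pre_match_rotation_py db_rot1 db_rot2 rotation_rows claimed → Spec_match_rotation_py db_rot1 db_rot2 rotation_rows claimed (match_rotation_py db_rot1 db_rot2 rotation_rows claimed)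

-- ===== LEMMAS AND PROOFS =====

-- the per-entry predicate: the entry's key is unclaimed and its pair matches
def entryOk (db_rot1 db_rot2 : String) (claimed : List Int) (e : Int × String × String) : Bool :=
  !(claimed.contains e.1) && (e.2.1 == db_rot1) && (e.2.2 == db_rot2)

-- the per-key predicate A effectively tests (lookup through the assoc list)
def keyOk (db_rot1 db_rot2 : String) (rotation_rows : List (Int × String × String))
    (claimed : List Int) (k : Int) : Bool :=
  !(claimed.contains k) &&
    (match rotation_rows.find? (fun e => e.1 == k) with
     | some e => e.2.1 == db_rot1 && e.2.2 == db_rot2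
     | none => false)

theorem matchRotLoopA_eq_find? (db_rot1 db_rot2 : String)
    (rotation_rows : List (Int × String × String)) (claimed : List Int) (l : List Int) :
    matchRotLoopA db_rot1 db_rot2 rotation_rows claimed l
      = l.find? (keyOk db_rot1 db_rot2 rotation_rows claimed) := by
  induction l with
  | nil => rfl
  | cons row rest ih =>
    simp only [matchRotLoopA, List.find?_cons, keyOk, ih]
    by_cases hm : row ∈ claimed
    · simp [hm]
    · cases hf : rotation_rows.find? (fun e => e.1 == row) with
      | none => simp [hm]
      | some e =>
        by_cases hq : (e.2.1 == db_rot1 && e.2.2 == db_rot2) = true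
        · simp [hm, hq]
        · rw [Bool.not_eq_true] at hq
          simp [hm, hq]

-- B's fold computes the minimum of the matching keys
theorem foldB_some (db_rot1 db_rot2 : String) (claimed : List Int)
    (rows : List (Int × String × String)) (b : Int) :
    rows.foldl
      (fun best e =>
        if claimed.contains e.1 || !(e.2.1 == db_rot1) || !(e.2.2 == db_rot2) then best
        else match best with
          | none => some e.1
          | some b => if e.1 < b then some e.1 else some b)
      (some b)
      = some (((rows.filter (entryOk db_rot1 db_rot2 claimed)).map (fun e => e.1)).foldl min b) := by
  induction rows generalizing b with
  | nil => rfl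
  | cons e rows ih =>
    simp only [List.foldl_cons, List.filter_cons]
    by_cases hok : entryOk db_rot1 db_rot2 claimed e = true
    · have h123 : claimed.contains e.1 = false ∧ (e.2.1 == db_rot1) = true ∧ (e.2.2 == db_rot2) = true := by
        simp only [entryOk, Bool.and_eq_true, Bool.not_eq_true'] at hok
        exact ⟨hok.1.1, hok.1.2, hok.2⟩
      have hcond : (claimed.contains e.1 || !(e.2.1 == db_rot1) || !(e.2.2 == db_rot2)) = false := by
        rw [h123.1, h123.2.1, h123.2.2]; rfl
      rw [hcond, if_pos hok]
      simp only [Bool.false_eq_true, if_false, List.map_cons, List.foldl_cons]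
      have hmin : (if e.1 < b then some e.1 else some b) = some (min b e.1) := by
        rcases lt_or_ge e.1 b with h | h
        · simp [h, min_eq_right (le_of_lt h)]
        · simp [not_lt.mpr h, min_eq_left h]
      rw [hmin, ih]
    · have hcond : (claimed.contains e.1 || !(e.2.1 == db_rot1) || !(e.2.2 == db_rot2)) = true := by
        simp only [entryOk, Bool.and_eq_true, Bool.not_eq_true'] at hok
        by_cases h1 : claimed.contains e.1 <;> by_cases h2 : (e.2.1 == db_rot1) = true <;>
          by_cases h3 : (e.2.2 == db_rot2) = true <;> simp_all
      rw [hcond, if_pos rfl, if_neg hok, ih]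

theorem foldB_none (db_rot1 db_rot2 : String) (claimed : List Int)
    (rows : List (Int × String × String)) :
    match_rotation_py_alt db_rot1 db_rot2 rows claimed
      = ((rows.filter (entryOk db_rot1 db_rot2 claimed)).map (fun e => e.1)).min? := by
  unfold match_rotation_py_alt
  induction rows with
  | nil => rfl
  | cons e rows ih =>
    simp only [List.foldl_cons, List.filter_cons]
    by_cases hok : entryOk db_rot1 db_rot2 claimed e = true
    · have h123 : claimed.contains e.1 = false ∧ (e.2.1 == db_rot1) = true ∧ (e.2.2 == db_rot2) = true := by
        simp only [entryOk, Bool.and_eq_true, Bool.not_eq_true'] at hok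
        exact ⟨hok.1.1, hok.1.2, hok.2⟩
      have hcond : (claimed.contains e.1 || !(e.2.1 == db_rot1) || !(e.2.2 == db_rot2)) = false := by
        rw [h123.1, h123.2.1, h123.2.2]; rfl
      rw [hcond, if_pos hok]
      simp only [Bool.false_eq_true, if_false, List.map_cons]
      rw [foldB_some]
      rfl
    · have hcond : (claimed.contains e.1 || !(e.2.1 == db_rot1) || !(e.2.2 == db_rot2)) = true := by
        simp only [entryOk, Bool.and_eq_true, Bool.not_eq_true'] at hok
        by_cases h1 : claimed.contains e.1 <;> by_cases h2 : (e.2.1 == db_rot1) = true <;>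
          by_cases h3 : (e.2.2 == db_rot2) = true <;> simp_all
      rw [hcond, if_pos rfl, if_neg hok, ih]

-- find? is the head of the filtered list
theorem find?_eq_head?_filter' {α : Type} (p : α → Bool) (l : List α) :
    l.find? p = (l.filter p).head? := by
  induction l with
  | nil => rfl
  | cons a l ih =>
    by_cases h : p a = true
    · rw [List.find?_cons_of_pos h, List.filter_cons_of_pos h, List.head?_cons]
    · rw [List.find?_cons_of_neg h, List.filter_cons_of_neg h, ih]

-- the head of a ≤-sorted list is the minimum of any rearrangement of it
theorem head?_eq_min?_of_pairwise_perm (t M : List Int)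
    (hp : t.Pairwise (· ≤ ·)) (hperm : t.Perm M) : t.head? = M.min? := by
  cases t with
  | nil => rw [← hperm.nil_eq]; rfl
  | cons a t' =>
    symm
    rw [List.head?_cons, List.min?_eq_some_iff]
    constructor
    · exact hperm.mem_iff.mp (List.mem_cons_self ..)
    · intro x hx
      have hx' : x ∈ a :: t' := hperm.mem_iff.mpr hx
      rcases List.mem_cons.mp hx' with h | h
      · exact le_of_eq h.symm
      · exact List.rel_of_pairwise_cons hp h

-- under unique keys, A's per-key test agrees with B's per-entry test on every entry
theorem keyOk_eq_entryOk (db_rot1 db_rot2 : String)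
    (rows : List (Int × String × String)) (claimed : List Int)
    (hnd : (rows.map (fun e => e.1)).Nodup)
    (e : Int × String × String) (he : e ∈ rows) :
    keyOk db_rot1 db_rot2 rows claimed e.1 = entryOk db_rot1 db_rot2 claimed e := by
  have hfind : rows.find? (fun x => x.1 == e.1) = some e := by
    induction rows with
    | nil => cases he
    | cons f rows ih =>
      rcases List.mem_cons.mp he with rfl | he'
      · simp
      · have hne : (f.1 == e.1) = false := by
          have : f.1 ≠ e.1 := by
            intro hEq
            have : e.1 ∈ rows.map (fun x => x.1) := List.mem_map_of_mem he'
            rw [← hEq] at this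
            exact (List.nodup_cons.mp (by simpa using hnd)).1 this
          simpa using this
        rw [List.find?_cons, hne]
        exact ih (List.nodup_cons.mp (by simpa using hnd)).2 he'
  simp [keyOk, entryOk, hfind, Bool.and_assoc]

theorem match_rotation_py_spec : Claim_equal_match_rotation_py := by
  intro db_rot1 db_rot2 rows claimed _ hpre
  unfold Spec_match_rotation_py
  unfold Pre_match_rotation_py at hpre
  rw [match_rotation_py, matchRotLoopA_eq_find?, find?_eq_head?_filter', foldB_none]
  apply head?_eq_min?_of_pairwise_perm
  · exact (PySem.List.sorted_pairwise ..).filter _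
  · calc ((PySem.List.sorted (rows.map (fun e => e.1)) (fun x => x) false).filter
            (keyOk db_rot1 db_rot2 rows claimed)).Perm
          ((rows.map (fun e => e.1)).filter (keyOk db_rot1 db_rot2 rows claimed)) :=
            (PySem.List.sorted_perm ..).filter _
      _ = (rows.filter (entryOk db_rot1 db_rot2 claimed)).map (fun e => e.1) := by
            rw [List.filter_map]
            congr 1
            apply List.filter_congr
            intro e he
            exact keyOk_eq_entryOk db_rot1 db_rot2 rows claimed hpre e he
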